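-- pv_equiv track=rewrite | github.com/kupl/Graphick | Heap_Abstracton/heap_merge_strategies.py | strategy_allocsite_type_keyword
-- ===== SOURCE A (Python) =====
-- def strategy_allocsite_type_keyword(obj_type_map, keywords):
--     print ('Default: allocsite, keywords: type, keywords: {}'.format(keywords))
--
--     keytype_rep_map = {}
--     rst = {}
--
--     for obj in obj_type_map.keys():
--         if obj_type_map[obj] in keywords:
--             if obj_type_map[obj] not in keytype_rep_map.keys():
--                 keytype_rep_map[obj_type_map[obj]] = obj
--             rst[obj] = keytype_rep_map[obj_type_map[obj]]
--         else:
--             rst[obj] = obj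
--     return rst
-- ===== SOURCE B (Python) =====
-- def strategy_allocsite_type_keyword(obj_type_map, keywords):
--     print ('Default: allocsite, keywords: type, keywords: {}'.format(keywords))
--
--     kset = set(keywords)
--     # first pass: first-seen representative per keyword type
--     rep = {}
--     for obj, t in obj_type_map.items():
--         if t in kset and t not in rep:
--             rep[t] = obj
--     # second pass: build the result from the finished representative map
--     return {obj: (rep[t] if t in kset else obj)
--             for obj, t in obj_type_map.items()}
-- ===== Notes on version B (the rewrite author's own statement) =====
-- stated objective: faster
-- what changed: A interleaves building the representative map and the result in one loop with a list-membership test and repeated obj_type_map[obj] lookups per entry; B first completes the representative map in one pass over .items() and then builds the result as a dict comprehension from the finished map, testing membership against a set of the keywords.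
import Mathlib
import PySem

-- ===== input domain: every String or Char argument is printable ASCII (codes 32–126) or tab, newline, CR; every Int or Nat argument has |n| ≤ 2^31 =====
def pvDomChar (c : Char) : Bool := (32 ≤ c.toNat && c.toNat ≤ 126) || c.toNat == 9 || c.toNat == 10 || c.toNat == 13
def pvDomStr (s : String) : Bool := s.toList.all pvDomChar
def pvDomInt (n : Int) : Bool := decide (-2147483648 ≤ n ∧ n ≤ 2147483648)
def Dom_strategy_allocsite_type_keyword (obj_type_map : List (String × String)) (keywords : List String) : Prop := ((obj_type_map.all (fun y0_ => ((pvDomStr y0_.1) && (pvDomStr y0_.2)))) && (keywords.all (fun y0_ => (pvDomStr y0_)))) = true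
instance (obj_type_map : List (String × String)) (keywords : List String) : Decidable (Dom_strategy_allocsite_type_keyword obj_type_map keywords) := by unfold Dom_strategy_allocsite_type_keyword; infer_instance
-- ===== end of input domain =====

-- B replaces A's single interleaved loop by two passes: first complete the
-- first-seen representative map, then build the result from the finished map.
-- The print side effect of the Pythons is not modelled (return value only).

-- ===== PORT A =====
-- one loop over the dict's keys, building keytype_rep_map and rst together
def strategy_allocsite_type_keyword (obj_type_map : List (String × String)) (keywords : List String) : List (String × String) :=
  let d := PySem.Dict.ofList obj_type_map
  let st := d.keys.foldl
    (fun (st : PySem.Dict String String × PySem.Dict String String) obj =>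
      if keywords.contains (d.getD obj "") then
        let krm := if st.1.contains (d.getD obj "") then st.1
                   else st.1.insert (d.getD obj "") obj
        (krm, st.2.insert obj (krm.getD (d.getD obj "") ""))
      else (st.1, st.2.insert obj obj))
    (PySem.Dict.empty, PySem.Dict.empty)
  st.2.items

-- ===== PORT B =====
-- pass 1: finished representative map; pass 2: result built from it
def strategy_allocsite_type_keyword_alt (obj_type_map : List (String × String)) (keywords : List String) : List (String × String) :=
  let d := PySem.Dict.ofList obj_type_map
  let kset := PySem.Set.ofList keywords
  let rep := d.items.foldl
    (fun (rep : PySem.Dict String String) p =>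
      if kset.contains p.2 && !(rep.contains p.2) then rep.insert p.2 p.1 else rep)
    PySem.Dict.empty
  d.items.map (fun p => (p.1, if kset.contains p.2 then rep.getD p.2 p.1 else p.1))

-- ===== PRECONDITION & SPEC =====
def Spec_strategy_allocsite_type_keyword (obj_type_map : List (String × String)) (keywords : List String) (out : List (String × String)) : Prop := out = strategy_allocsite_type_keyword_alt obj_type_map keywords
instance (obj_type_map : List (String × String)) (keywords : List String) (out : List (String × String)) : Decidable (Spec_strategy_allocsite_type_keyword obj_type_map keywords out) := by unfold Spec_strategy_allocsite_type_keyword; infer_instance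

-- ===== CLAIM (what is proved, stated in full; the proofs are below) =====
def Claim_equal_strategy_allocsite_type_keyword : Prop := ∀ (obj_type_map : List (String × String)) (keywords : List String), Dom_strategy_allocsite_type_keyword obj_type_map keywords → Spec_strategy_allocsite_type_keyword obj_type_map keywords (strategy_allocsite_type_keyword obj_type_map keywords)

-- ===== LEMMAS AND PROOFS =====

-- A's loop body, re-expressed on the (key, value) pair
def pvStepA (kws : List String) (st : PySem.Dict String String × PySem.Dict String String)
    (p : String × String) : PySem.Dict String String × PySem.Dict String String :=
  if kws.contains p.2 then
    let krm := if st.1.contains p.2 then st.1 else st.1.insert p.2 p.1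
    (krm, st.2.insert p.1 (krm.getD p.2 ""))
  else (st.1, st.2.insert p.1 p.1)

-- B's first pass, re-expressed with kws.contains
def pvStepB (kws : List String) (r : PySem.Dict String String) (p : String × String) :
    PySem.Dict String String :=
  if kws.contains p.2 && !(r.contains p.2) then r.insert p.2 p.1 else r

theorem pvSet_contains_ofList (kws : List String) (t : String) :
    PySem.Set.contains (PySem.Set.ofList kws) t = kws.contains t := by
  by_cases h : t ∈ kws <;>
    simp [PySem.Set.contains_eq_listContains, PySem.Set.mem_ofList, h]

-- once a key is in the representative map, pass 1 never changes its value
theorem pvStepB_mono (kws : List String) (l : List (String × String))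
    (r : PySem.Dict String String) (t : String) (v : String) (h : r.get? t = some v) :
    (l.foldl (pvStepB kws) r).get? t = some v := by
  induction l generalizing r with
  | nil => exact h
  | cons p tl ih =>
    simp only [List.foldl_cons]
    apply ih
    unfold pvStepB
    split
    · next hc =>
      have hne : t ≠ p.2 := by
        intro he
        have : r.contains p.2 = true := by
          rw [← he, PySem.Dict.contains_eq_isSome_get?, h]; rfl
        simp [this] at hc
      rw [PySem.Dict.get?_insert_of_ne _ _ hne]; exact h
    · exact h

-- main invariant: the rst built by A's loop lists the pairs of the prefix,
-- each keyword-typed object mapped to the FINAL representative of its type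
theorem pvMain (kws : List String) (l : List (String × String))
    (r rst : PySem.Dict String String)
    (hnd : (rst.keys ++ l.map (·.1)).Nodup) :
    (l.foldl (pvStepA kws) (r, rst)).2.items
      = rst.items ++ l.map (fun p => (p.1,
          if kws.contains p.2 then (l.foldl (pvStepB kws) r).getD p.2 p.1 else p.1)) := by
  induction l generalizing r rst with
  | nil => simp
  | cons p tl ih =>
    have hfresh : rst.contains p.1 = false := by
      rw [PySem.Dict.contains_eq_decide_mem_keys]
      simp only [decide_eq_false_iff_not]
      intro hmem
      exact (List.disjoint_of_nodup_append hnd) hmem (by simp)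
    have hr' : pvStepB kws r p = (if kws.contains p.2 then
        (if r.contains p.2 then r else r.insert p.2 p.1) else r) := by
      unfold pvStepB
      cases hk : kws.contains p.2 <;> cases hc : r.contains p.2 <;> rfl
    have hstep : pvStepA kws (r, rst) p
        = (pvStepB kws r p,
           rst.insert p.1 (if kws.contains p.2
             then (pvStepB kws r p).getD p.2 "" else p.1)) := by
      unfold pvStepA
      rw [hr']
      by_cases h1 : p.2 ∈ kws <;> simp [h1]
    have hnd' : ((rst.insert p.1 (if kws.contains p.2
          then (pvStepB kws r p).getD p.2 "" else p.1)).keys ++ tl.map (·.1)).Nodup := by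
      rw [PySem.Dict.keys_insert_of_not_contains _ _ hfresh]
      simpa using hnd
    simp only [List.foldl_cons, hstep]
    rw [ih _ _ hnd']
    rw [PySem.Dict.items_insert_of_not_contains _ _ hfresh]
    simp only [List.map_cons, List.append_assoc, List.singleton_append]
    congr 2
    by_cases h1 : p.2 ∈ kws
    · simp only [List.contains_iff_mem, h1, if_true]
      -- (pvStepB kws r p) contains p.2, so the later steps keep its value
      have hc : (pvStepB kws r p).contains p.2 = true := by
        rw [hr']
        by_cases h2 : r.contains p.2 = true <;>
          simp [h1, h2, PySem.Dict.contains_insert_self]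
      rw [PySem.Dict.contains_eq_isSome_get?] at hc
      obtain ⟨v, hv⟩ := Option.isSome_iff_exists.mp hc
      rw [PySem.Dict.getD_eq_get?_getD, hv,
        PySem.Dict.getD_eq_get?_getD, pvStepB_mono kws tl _ _ _ hv]
      rfl
    · simp [h1]

-- A's fold over d.keys equals the fold of pvStepA over d.items
theorem pvA_as_items (kws : List String) (d : PySem.Dict String String)
    (hnd : d.keys.Nodup)
    (st : PySem.Dict String String × PySem.Dict String String) :
    d.keys.foldl
      (fun st obj =>
        if kws.contains (d.getD obj "") then
          let krm := if st.1.contains (d.getD obj "") then st.1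
                     else st.1.insert (d.getD obj "") obj
          (krm, st.2.insert obj (krm.getD (d.getD obj "") ""))
        else (st.1, st.2.insert obj obj)) st
    = d.items.foldl (pvStepA kws) st := by
  have : d.keys = d.items.map (·.1) := rfl
  rw [this, List.foldl_map]
  apply PySem.List.foldl_congr_mem
  intro s p hp
  have hv : d.getD p.1 "" = p.2 := PySem.Dict.getD_of_mem_items _ hp hnd _
  unfold pvStepA
  rw [hv]

-- ===== VERDICT (by name: the statement is the Claim_ definition above) =====
theorem strategy_allocsite_type_keyword_spec : Claim_equal_strategy_allocsite_type_keyword := by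
  intro m kws _
  unfold Spec_strategy_allocsite_type_keyword
  have hnd : (PySem.Dict.ofList m).keys.Nodup := PySem.Dict.nodup_keys_ofList m
  simp only [strategy_allocsite_type_keyword, strategy_allocsite_type_keyword_alt]
  rw [pvA_as_items kws _ hnd]
  have hB : ((PySem.Dict.ofList m).items.foldl
      (fun (rep : PySem.Dict String String) p =>
        if PySem.Set.contains (PySem.Set.ofList kws) p.2 && !(rep.contains p.2)
        then rep.insert p.2 p.1 else rep) PySem.Dict.empty)
      = (PySem.Dict.ofList m).items.foldl (pvStepB kws) PySem.Dict.empty := by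
    apply PySem.List.foldl_congr_mem
    intro r p _
    unfold pvStepB
    rw [pvSet_contains_ofList]
  rw [hB]
  rw [pvMain kws (PySem.Dict.ofList m).items PySem.Dict.empty PySem.Dict.empty
    (by exact hnd)]
  simp only [PySem.Dict.empty, List.nil_append]
  apply List.map_congr_left
  intro p _
  rw [pvSet_contains_ofList]
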